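-- pv_equiv track=rewrite | github.com/PrimozBelej/SloTagger | skripte/nevronski_model.py | filter_sents
-- ===== SOURCE A (Python) =====
-- def filter_sents(sents, tags, maxlen_word, maxlen_sent):
--     filtered_sents = []
--     filtered_tags = []
--     for i in range(len(sents)):
--         if len(sents[i]) <= maxlen_sent:
--             filtered_sents.append(sents[i])
--             filtered_tags.append(tags[i])
--     sents = filtered_sents
--     tags = filtered_tags
--     filtered_sents = []
--     filtered_tags = []
--     for i in range(len(sents)):
--         if max([len(word) for word in sents[i]]) <= maxlen_word:
--             filtered_sents.append(sents[i])
--             filtered_tags.append(tags[i])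
--     sents = filtered_sents
--     tags = filtered_tags
--     return sents, tags
-- ===== SOURCE B (Python) =====
-- def filter_sents(sents, tags, maxlen_word, maxlen_sent):
--     # Single backward pass: walk the indices from the end, keep items passing the
--     # combined condition, then reverse the accumulated lists once at the end.
--     filtered_sents = []
--     filtered_tags = []
--     for i in range(len(sents) - 1, -1, -1):
--         if len(sents[i]) <= maxlen_sent and max([len(word) for word in sents[i]]) <= maxlen_word:
--             filtered_sents.append(sents[i])
--             filtered_tags.append(tags[i])
--     filtered_sents.reverse()
--     filtered_tags.reverse()
--     return filtered_sents, filtered_tags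
-- ===== Notes on version B (the rewrite author's own statement) =====
-- stated objective: alternative
-- what changed: One backward pass over the indices with the combined length/word-length condition, appending kept items and reversing once at the end, instead of A's two forward passes through intermediate filtered lists.
import Mathlib
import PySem

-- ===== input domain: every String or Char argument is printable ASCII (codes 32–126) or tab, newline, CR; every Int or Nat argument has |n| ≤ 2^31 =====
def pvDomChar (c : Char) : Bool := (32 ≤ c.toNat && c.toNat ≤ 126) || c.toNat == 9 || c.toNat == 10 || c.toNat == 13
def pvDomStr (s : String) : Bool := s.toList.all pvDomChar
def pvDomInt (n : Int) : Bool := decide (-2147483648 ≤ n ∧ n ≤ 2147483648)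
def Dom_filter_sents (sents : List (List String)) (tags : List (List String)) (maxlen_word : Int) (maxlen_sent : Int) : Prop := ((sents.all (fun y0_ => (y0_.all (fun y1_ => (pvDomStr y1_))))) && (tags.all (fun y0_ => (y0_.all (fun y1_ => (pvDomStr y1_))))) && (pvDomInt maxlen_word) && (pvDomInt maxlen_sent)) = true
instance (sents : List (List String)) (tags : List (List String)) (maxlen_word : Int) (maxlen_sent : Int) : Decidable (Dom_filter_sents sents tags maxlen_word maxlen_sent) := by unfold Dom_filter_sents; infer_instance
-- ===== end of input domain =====

-- ===== PORT A =====
-- B changes: one backward pass over the indices with the combined condition, appending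
-- kept items then reversing once, instead of A's two forward passes (objective: alternative).

-- Python's max([len(w) for w in s]); max([]) raises ValueError, which Pre_ excludes
-- (the 0 returned on [] here is never reached inside Pre_).
def pyMaxLen (s : List String) : Int :=
  match s.map (fun w => PySem.Str.len w) with
  | [] => 0
  | h :: t => t.foldl max h

-- Literal port of A: two passes over range(len(·)), appending to accumulator pairs.
-- tags[i] (Python: IndexError when i ≥ len(tags)) is ported with getD; Pre_ excludes
-- exactly the inputs where that index is out of range.
def filter_sents (sents : List (List String)) (tags : List (List String)) (maxlen_word : Int) (maxlen_sent : Int) : List (List String) × List (List String) :=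
  let p1 := (List.range sents.length).foldl
    (fun (acc : List (List String) × List (List String)) i =>
      if PySem.List.len (sents.getD i []) ≤ maxlen_sent then
        (acc.1 ++ [sents.getD i []], acc.2 ++ [tags.getD i []])
      else acc) ([], [])
  let sents2 := p1.1
  let tags2 := p1.2
  let p2 := (List.range sents2.length).foldl
    (fun (acc : List (List String) × List (List String)) i =>
      if pyMaxLen (sents2.getD i []) ≤ maxlen_word then
        (acc.1 ++ [sents2.getD i []], acc.2 ++ [tags2.getD i []])
      else acc) ([], [])
  (p2.1, p2.2)

-- ===== PORT B =====
-- Literal port of B: Python's range(len(sents)-1, -1, -1) is the index sequence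
-- len-1, …, 0, i.e. (List.range sents.length).reverse; one fold appending the kept
-- items, then list.reverse() on both accumulators.
def filter_sents_alt (sents : List (List String)) (tags : List (List String)) (maxlen_word : Int) (maxlen_sent : Int) : List (List String) × List (List String) :=
  let p := ((List.range sents.length).reverse).foldl
    (fun (acc : List (List String) × List (List String)) i =>
      if decide (PySem.List.len (sents.getD i []) ≤ maxlen_sent) &&
         decide (pyMaxLen (sents.getD i []) ≤ maxlen_word) then
        (acc.1 ++ [sents.getD i []], acc.2 ++ [tags.getD i []])
      else acc) ([], [])
  (p.1.reverse, p.2.reverse)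

-- ===== PRECONDITION & SPEC =====
-- Pre_ excludes exactly the inputs on which A raises: an empty sentence passing the
-- length test (ValueError from max([])) or a passing index with no matching tag entry
-- (IndexError from tags[i]).
def Pre_filter_sents (sents : List (List String)) (tags : List (List String)) (maxlen_word : Int) (maxlen_sent : Int) : Prop :=
  ∀ i ∈ List.range sents.length,
    PySem.List.len (sents.getD i []) ≤ maxlen_sent →
      sents.getD i [] ≠ [] ∧ i < tags.length
instance (sents : List (List String)) (tags : List (List String)) (maxlen_word : Int) (maxlen_sent : Int) : Decidable (Pre_filter_sents sents tags maxlen_word maxlen_sent) := by unfold Pre_filter_sents; infer_instance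

def pvWitness_filter_sents : List (List String) × List (List String) × Int × Int :=
  ([["ab", "c"], ["toolong"], ["x"]], [["N", "V"], ["A"], ["N"]], 3, 2)

def Spec_filter_sents (sents : List (List String)) (tags : List (List String)) (maxlen_word : Int) (maxlen_sent : Int) (out : List (List String) × List (List String)) : Prop := out = filter_sents_alt sents tags maxlen_word maxlen_sent
instance (sents : List (List String)) (tags : List (List String)) (maxlen_word : Int) (maxlen_sent : Int) (out : List (List String) × List (List String)) : Decidable (Spec_filter_sents sents tags maxlen_word maxlen_sent out) := by unfold Spec_filter_sents; infer_instance

-- ===== CLAIM (what is proved, stated in full; the proofs are below) =====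
def Claim_equal_filter_sents : Prop := ∀ (sents : List (List String)) (tags : List (List String)) (maxlen_word : Int) (maxlen_sent : Int), Dom_filter_sents sents tags maxlen_word maxlen_sent → Pre_filter_sents sents tags maxlen_word maxlen_sent → Spec_filter_sents sents tags maxlen_word maxlen_sent (filter_sents sents tags maxlen_word maxlen_sent)

-- ===== LEMMAS AND PROOFS =====

-- One filtering pass of A, with the predicate P on the sentence abstracted out.
def passStep (sents tags : List (List String)) (P : List String → Bool)
    (acc : List (List String) × List (List String)) (i : Nat) :
    List (List String) × List (List String) :=
  if P (sents.getD i []) then (acc.1 ++ [sents.getD i []], acc.2 ++ [tags.getD i []]) else acc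

-- Characterisation of A's index-fold pass as a filter of the zipped lists,
-- provided every index kept by P has a tag entry.
theorem pass_eq (P : List String → Bool) :
    ∀ (sents tags : List (List String)) (a b : List (List String)),
      (∀ i, i < sents.length → P (sents.getD i []) = true → i < tags.length) →
      (List.range sents.length).foldl (passStep sents tags P) (a, b)
        = (a ++ ((sents.zip tags).filter (fun p => P p.1)).map Prod.fst,
           b ++ ((sents.zip tags).filter (fun p => P p.1)).map Prod.snd) := by
  intro sents
  induction sents with
  | nil => intro tags a b _; simp
  | cons s ss ih =>
    intro tags a b h
    have hrange : List.range (s :: ss).length = 0 :: (List.range ss.length).map Nat.succ := by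
      simp [List.range_succ_eq_map]
    rw [hrange]
    cases tags with
    | nil =>
      have hP : P s = false := by
        by_contra hc
        have := h 0 (by simp) (by simpa using eq_true_of_ne_false hc)
        simp at this
      have hstep : ∀ acc i, passStep (s :: ss) ([] : List (List String)) P acc (Nat.succ i)
          = passStep ss ([] : List (List String)) P acc i := by
        intro acc i; simp [passStep]
      have hP' : ∀ i, i < ss.length → P (ss.getD i []) = true → i < ([] : List (List String)).length := by
        intro i hi hPi
        have := h (i + 1) (by simpa using Nat.succ_lt_succ hi) (by simpa [List.getD] using hPi)
        simp at this
      simp only [List.foldl_cons, List.foldl_map]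
      rw [show passStep (s :: ss) [] P (a, b) 0 = (a, b) by simp [passStep, hP]]
      have := ih ([] : List (List String)) a b hP'
      simp only at this ⊢
      calc (List.range ss.length).foldl (fun acc i => passStep (s :: ss) [] P acc (Nat.succ i)) (a, b)
          = (List.range ss.length).foldl (passStep ss [] P) (a, b) := by
            apply PySem.List.foldl_congr_mem; intro acc i _; exact hstep acc i
        _ = _ := by rw [this]; simp
    | cons t ts =>
      have hstep : ∀ acc i, passStep (s :: ss) (t :: ts) P acc (Nat.succ i)
          = passStep ss ts P acc i := by
        intro acc i; simp [passStep]
      have hP' : ∀ i, i < ss.length → P (ss.getD i []) = true → i < ts.length := by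
        intro i hi hPi
        have := h (i + 1) (by simpa using Nat.succ_lt_succ hi) (by simpa [List.getD] using hPi)
        simp at this; omega
      simp only [List.foldl_cons, List.foldl_map]
      have hconv : (List.range ss.length).foldl (fun acc i => passStep (s :: ss) (t :: ts) P acc (Nat.succ i))
            (passStep (s :: ss) (t :: ts) P (a, b) 0)
          = (List.range ss.length).foldl (passStep ss ts P) (passStep (s :: ss) (t :: ts) P (a, b) 0) := by
        apply PySem.List.foldl_congr_mem; intro acc i _; exact hstep acc i
      rw [hconv]
      by_cases hP : P s = true
      · rw [show passStep (s :: ss) (t :: ts) P (a, b) 0 = (a ++ [s], b ++ [t]) by simp [passStep, hP]]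
        rw [ih ts (a ++ [s]) (b ++ [t]) hP']
        simp [hP]
      · rw [show passStep (s :: ss) (t :: ts) P (a, b) 0 = (a, b) by simp [passStep, hP]]
        rw [ih ts a b hP']
        simp [hP]

theorem zip_map_fst_snd {α β : Type} (l : List (α × β)) :
    (l.map Prod.fst).zip (l.map Prod.snd) = l := by
  induction l with
  | nil => rfl
  | cons p l ih => simp [ih]

-- A generic index fold with an accumulator pair equals appending the filtered, mapped indices.
theorem foldl_idx (q : Nat → Bool) (f g : Nat → List String) :
    ∀ (L : List Nat) (a b : List (List String)),
      L.foldl (fun (acc : List (List String) × List (List String)) i =>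
          if q i then (acc.1 ++ [f i], acc.2 ++ [g i]) else acc) (a, b)
        = (a ++ (L.filter q).map f, b ++ (L.filter q).map g) := by
  intro L
  induction L with
  | nil => intro a b; simp
  | cons i L ih =>
    intro a b
    by_cases hq : q i = true
    · simp only [List.foldl_cons, hq, List.filter_cons_of_pos hq]
      rw [ih]; simp
    · simp only [List.foldl_cons, List.filter_cons_of_neg hq, if_neg hq]
      exact ih a b

-- ===== VERDICT (by name: the statement is the Claim_ definition above) =====
theorem filter_sents_spec : Claim_equal_filter_sents := by
  intro sents tags maxlen_word maxlen_sent _ hpre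
  unfold Spec_filter_sents filter_sents filter_sents_alt
  set P1 : List String → Bool := fun s => decide (PySem.List.len s ≤ maxlen_sent) with hP1
  set P2 : List String → Bool := fun s => decide (pyMaxLen s ≤ maxlen_word) with hP2
  set Pc : List String → Bool := fun s => P1 s && P2 s with hPc
  -- ---- A's side: two forward passes = one zip filter with P2 && P1 ----
  have h1 : ∀ i, i < sents.length → P1 (sents.getD i []) = true → i < tags.length := by
    intro i hi hPi
    exact (hpre i (by simpa using hi) (by simpa [hP1] using hPi)).2
  have e1 := pass_eq P1 sents tags [] [] h1
  set k1 := (sents.zip tags).filter (fun p => P1 p.1) with hk1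
  simp only [List.nil_append] at e1
  have step1 : (fun (acc : List (List String) × List (List String)) i =>
      if PySem.List.len (sents.getD i []) ≤ maxlen_sent then
        (acc.1 ++ [sents.getD i []], acc.2 ++ [tags.getD i []]) else acc)
      = passStep sents tags P1 := by
    funext acc i; simp [passStep, hP1]
  rw [step1, e1]
  set S1 := k1.map Prod.fst with hS1
  set T1 := k1.map Prod.snd with hT1
  have h2 : ∀ i, i < S1.length → P2 (S1.getD i []) = true → i < T1.length := by
    intro i hi _; simpa [hS1, hT1] using hi
  have e2 := pass_eq P2 S1 T1 [] [] h2
  simp only [List.nil_append] at e2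
  have step2 : (fun (acc : List (List String) × List (List String)) i =>
      if pyMaxLen (S1.getD i []) ≤ maxlen_word then
        (acc.1 ++ [S1.getD i []], acc.2 ++ [T1.getD i []]) else acc)
      = passStep S1 T1 P2 := by
    funext acc i; simp [passStep, hP2]
  dsimp only
  rw [step2, e2]
  have hzip : S1.zip T1 = k1 := zip_map_fst_snd k1
  rw [hzip, hk1, List.filter_filter]
  -- ---- B's side: backward pass + reverse = the same zip filter with P1 && P2 ----
  set q : Nat → Bool := fun i => Pc (sents.getD i []) with hq
  set f : Nat → List String := fun i => sents.getD i [] with hf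
  set g : Nat → List String := fun i => tags.getD i [] with hg
  have stepB : (fun (acc : List (List String) × List (List String)) i =>
      if decide (PySem.List.len (sents.getD i []) ≤ maxlen_sent) &&
         decide (pyMaxLen (sents.getD i []) ≤ maxlen_word) then
        (acc.1 ++ [sents.getD i []], acc.2 ++ [tags.getD i []]) else acc)
      = (fun (acc : List (List String) × List (List String)) i =>
          if q i then (acc.1 ++ [f i], acc.2 ++ [g i]) else acc) := by
    funext acc i; simp [hq, hPc, hP1, hP2, hf, hg]
  have eBrev := foldl_idx q f g ((List.range sents.length).reverse) [] []
  have eBfwd := foldl_idx q f g (List.range sents.length) [] []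
  simp only [List.nil_append] at eBrev eBfwd
  -- bridge: forward fold also equals A-style passStep fold with Pc
  have hc : ∀ i, i < sents.length → Pc (sents.getD i []) = true → i < tags.length := by
    intro i hi hPi
    have : P1 (sents.getD i []) = true := by
      have := hPi; simp [hPc] at this; simp [this.1]
    exact h1 i hi this
  have ePc := pass_eq Pc sents tags [] [] hc
  simp only [List.nil_append] at ePc
  have stepPc : (fun (acc : List (List String) × List (List String)) i =>
      if q i then (acc.1 ++ [f i], acc.2 ++ [g i]) else acc)
      = passStep sents tags Pc := by
    funext acc i; simp [passStep, hq, hf, hg]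
  have bridge : ((List.filter q (List.range sents.length)).map f,
                 (List.filter q (List.range sents.length)).map g)
      = (((sents.zip tags).filter (fun p => Pc p.1)).map Prod.fst,
         ((sents.zip tags).filter (fun p => Pc p.1)).map Prod.snd) := by
    rw [← eBfwd, stepPc, ePc]
  rw [stepB, eBrev]
  simp only [List.filter_reverse, List.map_reverse, List.reverse_reverse]
  rw [Prod.mk.injEq] at bridge
  rw [bridge.1, bridge.2]
  -- both sides are now zip filters; the conjunction commutes
  have hcomm : (fun a : List String × List String => P2 a.1 && P1 a.1)
      = (fun p : List String × List String => Pc p.1) := by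
    funext p; simp [hPc, Bool.and_comm]
  rw [hcomm]
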